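-- pv_equiv track=rewrite | github.com/SoftSec-KAIST/Eclipser-Artifact | docker-scripts/experiment-scripts/coreutils-exp/options.py | get_eclipser_option
-- ===== SOURCE A (Python) =====
-- def get_klee_option(target) :
--     if target == "dd" :
--         return "--sym-args 0 3 10 --sym-files 1 8 --sym-stdin 8 --sym-stdout"
--     elif target == "dircolors" :
--         return "--sym-args 0 3 10 --sym-files 2 12 --sym-stdin 12 --sym-stdout"
--     elif target == "echo" :
--         return "--sym-args 0 4 300 --sym-files 2 30 --sym-stdin 30 --sym-stdout"
--     elif target == "expr" :
--         return "--sym-args 0 1 10 --sym-args 0 3 2 --sym-stdout"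
--     elif target == "mknod" :
--         return "--sym-args 0 1 10 --sym-args 0 3 2 --sym-files 1 8 --sym-stdin 8 --sym-stdout"
--     elif target == "od":
--         return "--sym-args 0 3 10 --sym-files 2 12 --sym-stdin 12 --sym-stdout"
--     elif target == "pathchk":
--         return "--sym-args 0 1 2 --sym-args 0 1 300 --sym-files 1 8 --sym-stdin 8 --sym-stdout"
--     elif target == "printf":
--         return "--sym-args 0 3 10 --sym-files 2 12 --sym-stdin 12 --sym-stdout"
--     else :
--         return "--sym-args 0 1 10 --sym-args 0 2 2 --sym-files 1 8 --sym-stdin 8 --sym-stdout"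
--
-- def get_eclipser_option(target):
--     klee_option = get_klee_option(target)
--
--     arg_option = "--maxarglen"
--     file_option = ""
--     stdin_option = ""
--
--     # Convert KLEE option to corresponding Eclipser option
--     klee_args = klee_option.split("--")
--     for klee_arg in klee_args:
--         tokens = klee_arg.split()
--         if len(tokens) == 0 :
--             continue
--         if tokens[0] == "sym-args" :
--             assert(len(tokens) == 4)
--             arg_no = int(tokens[2]) # Not [1]
--             arg_len = int(tokens[3])
--             arg_option += (" %d" % arg_len) * arg_no
--         elif tokens[0] == "sym-files" :
--             assert(len(tokens) == 3)
--             file_len = int(tokens[2]) # Not [1]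
--             file_option = "--maxfilelen %d" % file_len
--         elif tokens[0] == "sym-stdin" :
--             assert(len(tokens) == 2)
--             stdin_len = int(tokens[1])
--             stdin_option = "--maxstdinlen %d" % stdin_len
--
--     if file_option == "" and stdin_option == "":
--         src_option = "--src arg"
--     else:
--         src_option = "--src auto"
--
--     return "%s %s %s %s" % (src_option, arg_option, file_option, stdin_option)
-- ===== SOURCE B (Python) =====
-- # The KLEE option strings are a fixed finite set, so the conversion can be
-- # precomputed once into a lookup table instead of re-parsed per call.
-- _DEFAULT = "--src auto --maxarglen 10 2 2 --maxfilelen 8 --maxstdinlen 8"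
-- _TABLE = {
--     "dd":        "--src auto --maxarglen 10 10 10 --maxfilelen 8 --maxstdinlen 8",
--     "dircolors": "--src auto --maxarglen 10 10 10 --maxfilelen 12 --maxstdinlen 12",
--     "echo":      "--src auto --maxarglen 300 300 300 300 --maxfilelen 30 --maxstdinlen 30",
--     "expr":      "--src arg --maxarglen 10 2 2 2  ",
--     "mknod":     "--src auto --maxarglen 10 2 2 2 --maxfilelen 8 --maxstdinlen 8",
--     "od":        "--src auto --maxarglen 10 10 10 --maxfilelen 12 --maxstdinlen 12",
--     "pathchk":   "--src auto --maxarglen 2 300 --maxfilelen 8 --maxstdinlen 8",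
--     "printf":    "--src auto --maxarglen 10 10 10 --maxfilelen 12 --maxstdinlen 12",
-- }
--
-- def get_eclipser_option(target):
--     return _TABLE.get(target, _DEFAULT)
-- ===== Notes on version B (the rewrite author's own statement) =====
-- stated objective: faster
-- what changed: The per-call split/tokenize/dispatch conversion loop is replaced by a single dict lookup over the finite, precomputed table of converted option strings (the KLEE options form a fixed 9-element set).
import Mathlib
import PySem

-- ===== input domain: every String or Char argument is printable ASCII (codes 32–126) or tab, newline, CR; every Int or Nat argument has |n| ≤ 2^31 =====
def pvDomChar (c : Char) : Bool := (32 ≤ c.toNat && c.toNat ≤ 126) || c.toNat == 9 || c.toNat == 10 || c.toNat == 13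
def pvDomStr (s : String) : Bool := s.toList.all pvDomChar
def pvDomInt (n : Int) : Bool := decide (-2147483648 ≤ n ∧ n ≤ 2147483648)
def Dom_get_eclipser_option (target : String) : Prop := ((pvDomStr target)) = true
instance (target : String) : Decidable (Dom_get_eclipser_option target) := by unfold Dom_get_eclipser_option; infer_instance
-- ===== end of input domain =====

-- B replaces A's per-call split/tokenize/dispatch conversion loop by a single lookup in a
-- precomputed table of the 9 possible converted strings (objective: faster, constant factor).

-- ===== PORT A =====
def get_klee_option (target : String) : String :=
  if target = "dd" then "--sym-args 0 3 10 --sym-files 1 8 --sym-stdin 8 --sym-stdout"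
  else if target = "dircolors" then "--sym-args 0 3 10 --sym-files 2 12 --sym-stdin 12 --sym-stdout"
  else if target = "echo" then "--sym-args 0 4 300 --sym-files 2 30 --sym-stdin 30 --sym-stdout"
  else if target = "expr" then "--sym-args 0 1 10 --sym-args 0 3 2 --sym-stdout"
  else if target = "mknod" then "--sym-args 0 1 10 --sym-args 0 3 2 --sym-files 1 8 --sym-stdin 8 --sym-stdout"
  else if target = "od" then "--sym-args 0 3 10 --sym-files 2 12 --sym-stdin 12 --sym-stdout"
  else if target = "pathchk" then "--sym-args 0 1 2 --sym-args 0 1 300 --sym-files 1 8 --sym-stdin 8 --sym-stdout"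
  else if target = "printf" then "--sym-args 0 3 10 --sym-files 2 12 --sym-stdin 12 --sym-stdout"
  else "--sym-args 0 1 10 --sym-args 0 2 2 --sym-files 1 8 --sym-stdin 8 --sym-stdout"

-- one iteration of A's conversion loop; state = (arg_option, file_option, stdin_option) as char lists
def pvConvStep (st : List Char × List Char × List Char) (klee_arg : List Char) :
    List Char × List Char × List Char :=
  let tokens := PySem.Chars.split₀ klee_arg
  if tokens.length = 0 then st
  else if PySem.List.pyGetD tokens 0 [] = "sym-args".toList then
    -- int(tokens[2]), int(tokens[3]); the `none` branch is unreachable on A's constant options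
    match PySem.Int.ofChars? (PySem.List.pyGetD tokens 2 []),
          PySem.Int.ofChars? (PySem.List.pyGetD tokens 3 []) with
    | some arg_no, some arg_len =>
        ⟨st.1 ++ PySem.List.pyRepeat (' ' :: (PySem.Int.toStr arg_len).toList) arg_no, st.2.1, st.2.2⟩
    | _, _ => st
  else if PySem.List.pyGetD tokens 0 [] = "sym-files".toList then
    match PySem.Int.ofChars? (PySem.List.pyGetD tokens 2 []) with
    | some file_len => ⟨st.1, "--maxfilelen ".toList ++ (PySem.Int.toStr file_len).toList, st.2.2⟩
    | none => st
  else if PySem.List.pyGetD tokens 0 [] = "sym-stdin".toList then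
    match PySem.Int.ofChars? (PySem.List.pyGetD tokens 1 []) with
    | some stdin_len => ⟨st.1, st.2.1, "--maxstdinlen ".toList ++ (PySem.Int.toStr stdin_len).toList⟩
    | none => st
  else st

-- everything of A after the call to get_klee_option
def pvConvert (klee_option : String) : String :=
  let klee_args := PySem.Chars.splitOn klee_option.toList "--".toList
  let st := klee_args.foldl pvConvStep ("--maxarglen".toList, ([] : List Char), ([] : List Char))
  let src_option := if st.2.1 = [] ∧ st.2.2 = [] then "--src arg".toList else "--src auto".toList
  String.ofList (src_option ++ ' ' :: st.1 ++ ' ' :: st.2.1 ++ ' ' :: st.2.2)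

def get_eclipser_option (target : String) : String :=
  pvConvert (get_klee_option target)

-- ===== PORT B =====
def pvEclipserDefault : String := "--src auto --maxarglen 10 2 2 --maxfilelen 8 --maxstdinlen 8"

def pvEclipserTable : PySem.Dict String String := PySem.Dict.ofList
  [("dd",        "--src auto --maxarglen 10 10 10 --maxfilelen 8 --maxstdinlen 8"),
   ("dircolors", "--src auto --maxarglen 10 10 10 --maxfilelen 12 --maxstdinlen 12"),
   ("echo",      "--src auto --maxarglen 300 300 300 300 --maxfilelen 30 --maxstdinlen 30"),
   ("expr",      "--src arg --maxarglen 10 2 2 2  "),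
   ("mknod",     "--src auto --maxarglen 10 2 2 2 --maxfilelen 8 --maxstdinlen 8"),
   ("od",        "--src auto --maxarglen 10 10 10 --maxfilelen 12 --maxstdinlen 12"),
   ("pathchk",   "--src auto --maxarglen 2 300 --maxfilelen 8 --maxstdinlen 8"),
   ("printf",    "--src auto --maxarglen 10 10 10 --maxfilelen 12 --maxstdinlen 12")]

def get_eclipser_option_alt (target : String) : String :=
  PySem.Dict.getD pvEclipserTable target pvEclipserDefault

-- ===== PRECONDITION & SPEC =====
def Spec_get_eclipser_option (target : String) (out : String) : Prop := out = get_eclipser_option_alt target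
instance (target : String) (out : String) : Decidable (Spec_get_eclipser_option target out) := by unfold Spec_get_eclipser_option; infer_instance

-- ===== CLAIM (what is proved, stated in full; the proofs are below) =====
def Claim_equal_get_eclipser_option : Prop := ∀ (target : String), Dom_get_eclipser_option target → Spec_get_eclipser_option target (get_eclipser_option target)

-- ===== LEMMAS AND PROOFS =====

-- ===== VERDICT (by name: the statement is the Claim_ definition above) =====
theorem get_eclipser_option_spec : Claim_equal_get_eclipser_option := by
  intro target _
  unfold Spec_get_eclipser_option
  by_cases h1 : target = "dd"; · subst h1; decide
  by_cases h2 : target = "dircolors"; · subst h2; decide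
  by_cases h3 : target = "echo"; · subst h3; decide
  by_cases h4 : target = "expr"; · subst h4; decide
  by_cases h5 : target = "mknod"; · subst h5; decide
  by_cases h6 : target = "od"; · subst h6; decide
  by_cases h7 : target = "pathchk"; · subst h7; decide
  by_cases h8 : target = "printf"; · subst h8; decide
  have hk : get_klee_option target =
      "--sym-args 0 1 10 --sym-args 0 2 2 --sym-files 1 8 --sym-stdin 8 --sym-stdout" := by
    simp [get_klee_option, h1, h2, h3, h4, h5, h6, h7, h8]
  have ht : pvEclipserTable = PySem.Dict.mk
      [("dd",        "--src auto --maxarglen 10 10 10 --maxfilelen 8 --maxstdinlen 8"),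
       ("dircolors", "--src auto --maxarglen 10 10 10 --maxfilelen 12 --maxstdinlen 12"),
       ("echo",      "--src auto --maxarglen 300 300 300 300 --maxfilelen 30 --maxstdinlen 30"),
       ("expr",      "--src arg --maxarglen 10 2 2 2  "),
       ("mknod",     "--src auto --maxarglen 10 2 2 2 --maxfilelen 8 --maxstdinlen 8"),
       ("od",        "--src auto --maxarglen 10 10 10 --maxfilelen 12 --maxstdinlen 12"),
       ("pathchk",   "--src auto --maxarglen 2 300 --maxfilelen 8 --maxstdinlen 8"),
       ("printf",    "--src auto --maxarglen 10 10 10 --maxfilelen 12 --maxstdinlen 12")] := by decide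
  have hb : get_eclipser_option_alt target = pvEclipserDefault := by
    simp [get_eclipser_option_alt, ht, PySem.Dict.getD_eq_get?_getD, PySem.Dict.get?,
      Ne.symm h1, Ne.symm h2, Ne.symm h3, Ne.symm h4, Ne.symm h5, Ne.symm h6, Ne.symm h7, Ne.symm h8]
  rw [hb, get_eclipser_option, hk]
  decide
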